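-- pv_equiv track=rewrite | github.com/michael-betz/espirgbani_pio | dev/font_converter.py | get_n_ascii
-- ===== SOURCE A (Python) =====
-- def get_n_ascii(cp_set):
--     """how many characters correspond to the basic ascii scheme?"""
--     first_char = 0
--     for i, cp in enumerate(cp_set):
--         if i == 0:
--             first_char = cp
--         elif first_char + i != cp:
--             return (first_char, i)
--     return (first_char, len(cp_set))
-- ===== SOURCE B (Python) =====
-- def _run(seg, base):
--     """divide & conquer: length of longest prefix of seg equal to base, base+1, ..."""
--     if len(seg) <= 1:
--         return 0 if not seg else (1 if seg[0] == base else 0)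
--     m = len(seg) // 2
--     left = _run(seg[:m], base)
--     if left < m:
--         return left
--     return left + _run(seg[m:], base + m)
--
--
-- def get_n_ascii(cp_set):
--     """how many characters correspond to the basic ascii scheme?"""
--     if not cp_set:
--         return (0, 0)
--     return (cp_set[0], _run(cp_set, cp_set[0]))
-- ===== Notes on version B (the rewrite author's own statement) =====
-- stated objective: alternative
-- what changed: B computes the run length by divide-and-conquer: it splits the list in half, solves each half against a shifted base, and combines with the rule 'if the left half's run is shorter than the half, keep it, else add the right half's run' — instead of A's single enumerate scan with early return.
import Mathlib
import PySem

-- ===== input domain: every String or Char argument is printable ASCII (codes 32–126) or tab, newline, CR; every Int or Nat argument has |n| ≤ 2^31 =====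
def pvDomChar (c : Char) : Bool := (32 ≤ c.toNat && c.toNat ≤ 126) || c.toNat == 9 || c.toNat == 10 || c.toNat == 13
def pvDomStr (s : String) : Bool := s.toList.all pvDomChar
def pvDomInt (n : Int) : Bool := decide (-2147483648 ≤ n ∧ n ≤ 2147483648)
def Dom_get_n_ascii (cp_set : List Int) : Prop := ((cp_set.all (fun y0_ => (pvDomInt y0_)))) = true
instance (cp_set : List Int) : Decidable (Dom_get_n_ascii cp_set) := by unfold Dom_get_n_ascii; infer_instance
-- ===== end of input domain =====

-- B computes the run length by divide-and-conquer (split in half, combine with a shifted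
-- base) instead of A's single enumerate scan with early return; same O(n), different structure.

-- ===== PORT A =====
-- A's loop over enumerate(cp_set): first_char is set at i = 0, then each element is
-- compared against first_char + i with an early return (first_char, i).
def getAGo (L : Int) (first_char : Int) (rest : List (Int × Int)) : List Int :=
  match rest with
  | [] => [first_char, L]
  | (i, cp) :: t =>
    if i = 0 then getAGo L cp t
    else if first_char + i ≠ cp then [first_char, i]
    else getAGo L first_char t

def get_n_ascii (cp_set : List Int) : List Int :=
  getAGo (cp_set.length : Int) 0 (PySem.List.enumerate cp_set)

-- ===== PORT B =====
-- B's _run: divide & conquer, seg[:m] / seg[m:] become take / drop.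
-- (fuel = seg.length bounds the recursion depth; it is only a totality guard)
def runDCFuel (fuel : Nat) (seg : List Int) (base : Int) : Int :=
  match fuel with
  | 0 => 0
  | fuel + 1 =>
    if seg.length ≤ 1 then
      match seg with
      | [] => 0
      | x :: _ => if x = base then 1 else 0
    else
      if runDCFuel fuel (seg.take (seg.length / 2)) base < ((seg.length / 2 : Nat) : Int) then
        runDCFuel fuel (seg.take (seg.length / 2)) base
      else
        runDCFuel fuel (seg.take (seg.length / 2)) base +
          runDCFuel fuel (seg.drop (seg.length / 2)) (base + ((seg.length / 2 : Nat) : Int))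

def runDC (seg : List Int) (base : Int) : Int := runDCFuel seg.length seg base

def get_n_ascii_alt (cp_set : List Int) : List Int :=
  match cp_set with
  | [] => [0, 0]
  | c :: _ => [c, runDC cp_set c]

-- ===== PRECONDITION & SPEC =====
def Spec_get_n_ascii (cp_set : List Int) (out : List Int) : Prop := out = get_n_ascii_alt cp_set
instance (cp_set : List Int) (out : List Int) : Decidable (Spec_get_n_ascii cp_set out) := by unfold Spec_get_n_ascii; infer_instance

-- ===== CLAIM (what is proved, stated in full; the proofs are below) =====
def Claim_equal_get_n_ascii : Prop := ∀ (cp_set : List Int), Dom_get_n_ascii cp_set → Spec_get_n_ascii cp_set (get_n_ascii cp_set)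

-- ===== LEMMAS AND PROOFS =====

-- Common specification: length of the longest prefix of xs equal to b, b+1, b+2, …
def specRun (xs : List Int) (b : Int) : Int :=
  match xs with
  | [] => 0
  | x :: t => if x = b then 1 + specRun t (b + 1) else 0

theorem specRun_le_length (xs : List Int) : ∀ b, specRun xs b ≤ (xs.length : Int) := by
  induction xs with
  | nil => intro b; simp [specRun]
  | cons x t ih =>
    intro b
    simp only [specRun, List.length_cons]
    split
    · have := ih (b + 1); push_cast; omega
    · push_cast; omega

-- How specRun splits across an append: the d&c combine rule.
theorem specRun_append (L R : List Int) : ∀ b,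
    specRun (L ++ R) b =
      if specRun L b < (L.length : Int) then specRun L b
      else (L.length : Int) + specRun R (b + L.length) := by
  induction L with
  | nil => intro b; simp [specRun]
  | cons x L' ih =>
    intro b
    simp only [List.cons_append, specRun, List.length_cons]
    by_cases hx : x = b
    · rw [if_pos hx, if_pos hx, ih (b + 1)]
      have h1 : specRun L' (b + 1) < (L'.length : Int) ↔
          1 + specRun L' (b + 1) < ((L'.length : Int) + 1) := by omega
      by_cases hc : specRun L' (b + 1) < (L'.length : Int)
      · rw [if_pos hc, if_pos (by push_cast; omega)]
      · rw [if_neg hc, if_neg (by push_cast; omega)]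
        push_cast
        ring_nf
    · rw [if_neg hx, if_neg hx, if_pos (by push_cast; have := L'.length.zero_le; omega)]

-- B's divide & conquer computes specRun.
theorem runDCFuel_eq_specRun (fuel : Nat) : ∀ (seg : List Int), seg.length ≤ fuel → ∀ b,
    runDCFuel fuel seg b = specRun seg b := by
  induction fuel with
  | zero =>
    intro seg hlen b
    have : seg = [] := List.eq_nil_of_length_eq_zero (by omega)
    subst this
    simp [runDCFuel, specRun]
  | succ n ih =>
    intro seg hlen b
    simp only [runDCFuel]
    by_cases h1 : seg.length ≤ 1
    · rw [if_pos h1]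
      match seg, h1 with
      | [], _ => simp [specRun]
      | [x], _ => simp [specRun]
    · rw [if_neg h1]
      have hm1 : 1 ≤ seg.length / 2 := by omega
      have hm2 : seg.length / 2 < seg.length := by omega
      have hL : (seg.take (seg.length / 2)).length = seg.length / 2 := by
        simp [List.length_take]; omega
      have hR : (seg.drop (seg.length / 2)).length = seg.length - seg.length / 2 := by
        simp [List.length_drop]
      rw [ih _ (by rw [hL]; omega) b, ih _ (by rw [hR]; omega) (b + (seg.length / 2 : Nat))]
      have hsplit := specRun_append (seg.take (seg.length / 2)) (seg.drop (seg.length / 2)) b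
      rw [List.take_append_drop] at hsplit
      rw [hsplit, hL]
      have hle := specRun_le_length (seg.take (seg.length / 2)) b
      rw [hL] at hle
      split_ifs with hc
      · rfl
      · omega

-- A's indexed scan of the tail (from index k ≥ 1) computes k + specRun of the tail.
theorem getA_eq_spec (t : List Int) : ∀ (L c k : Int), 1 ≤ k → k = L - (t.length : Int) →
    getAGo L c (PySem.List.enumerate t k) = [c, k + specRun t (c + k)] := by
  induction t with
  | nil =>
    intro L c k hk hL
    simp only [List.length_nil, Int.ofNat_zero] at hL
    simp [PySem.List.enumerate_nil, getAGo, specRun]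
    omega
  | cons x t' ih =>
    intro L c k hk hL
    rw [PySem.List.enumerate_cons]
    show getAGo L c ((k, x) :: PySem.List.enumerate t' (k + 1)) = _
    simp only [getAGo, specRun]
    have hk0 : ¬ (k = 0) := by omega
    by_cases hx : x = c + k
    · rw [if_neg hk0, if_neg (show ¬ (c + k ≠ x) by omega), if_pos hx,
        ih L c (k + 1) (by omega) (by simp only [List.length_cons] at hL; push_cast at hL ⊢; omega)]
      have harg : c + k + 1 = c + (k + 1) := by ring
      rw [harg]
      congr 2
      omega
    · rw [if_neg hk0, if_pos (show c + k ≠ x by omega), if_neg hx]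
      simp

-- ===== VERDICT (by name: the statement is the Claim_ definition above) =====
theorem get_n_ascii_spec : Claim_equal_get_n_ascii := by
  intro cp_set _
  unfold Spec_get_n_ascii
  cases cp_set with
  | nil => decide
  | cons c t =>
    show getAGo _ 0 (PySem.List.enumerate (c :: t)) = _
    rw [PySem.List.enumerate_cons]
    show getAGo _ 0 ((0, c) :: PySem.List.enumerate t (0 + 1)) = _
    simp only [getAGo, zero_add]
    rw [getA_eq_spec t _ c 1 (by omega)
      (by simp only [List.length_cons]; push_cast; omega)]
    show _ = [c, runDC (c :: t) c]
    show _ = [c, runDCFuel (c :: t).length (c :: t) c]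
    rw [runDCFuel_eq_specRun (c :: t).length (c :: t) le_rfl c]
    simp [specRun]
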